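-- pv_equiv track=rewrite | github.com/justgotothedesk/Algorithm_Study | Programmers/과일장수.py | solution
-- ===== SOURCE A (Python) =====
-- def solution(k, m, score):
--     answer = 0
--     score.sort(reverse=True)
--     box = []
--     temp = []
--     cnt = 0
--
--     for i in score:
--         temp.append(i)
--         cnt += 1
--         if cnt%m == 0:
--             box.append(temp)
--             cnt = 0
--             temp = []
--     for i in box:
--         answer += min(i)*m
--
--     return answer
-- ===== SOURCE B (Python) =====
-- def solution(k, m, score):
--     # Same in-place descending sort as A; the minimum of each full box of m
--     # consecutive scores is its last element, so sum those directly by stride.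
--     score.sort(reverse=True)
--     return m * sum(score[i] for i in range(m - 1, len(score), m))
-- ===== Notes on version B (the rewrite author's own statement) =====
-- stated objective: simpler
-- what changed: B drops A's whole box-building machinery (temp list, cnt counter, nested box list, per-box min) and, after the identical in-place descending sort, sums the last element of each full box directly with one strided index loop: m * sum(score[i] for i in range(m-1, len(score), m)).
-- outside the precondition, e.g. on solution(0, 0, []): A returns 0, B raises ValueError; on solution(0, -1, [3, 1]): A returns -4, B returns 0
import Mathlib
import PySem

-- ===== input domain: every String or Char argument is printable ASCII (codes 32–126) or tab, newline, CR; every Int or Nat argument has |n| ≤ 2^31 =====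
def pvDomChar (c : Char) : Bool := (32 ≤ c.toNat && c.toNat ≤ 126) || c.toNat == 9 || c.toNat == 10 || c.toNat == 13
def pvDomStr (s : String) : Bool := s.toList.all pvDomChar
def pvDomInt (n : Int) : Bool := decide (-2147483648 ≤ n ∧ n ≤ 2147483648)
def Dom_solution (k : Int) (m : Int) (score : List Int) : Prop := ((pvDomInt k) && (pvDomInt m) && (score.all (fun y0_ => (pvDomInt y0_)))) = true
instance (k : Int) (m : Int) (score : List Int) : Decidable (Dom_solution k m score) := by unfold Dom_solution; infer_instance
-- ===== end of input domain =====

-- B replaces A's box-building loop (temp/cnt state, nested lists, per-box min) by one strided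
-- index sum over the same in-place-sorted list (simpler decomposition, same asymptotic cost).
-- Both A and B sort `score` in place identically; the equivalence proved is about the return value.

-- ===== PORT A =====
-- loop body of A's first `for i in score:` loop; state = (box, temp, cnt)
def stepA (m : Int) (st : List (List Int) × List Int × Int) (i : Int) : List (List Int) × List Int × Int :=
  let temp := st.2.1 ++ [i]
  let cnt := st.2.2 + 1
  if PySem.Int.mod cnt m == 0 then (st.1 ++ [temp], [], 0) else (st.1, temp, cnt)

def solution (k : Int) (m : Int) (score : List Int) : Int :=
  let answer : Int := 0
  let s := PySem.List.sorted score (fun x => x) true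
  let st := s.foldl (stepA m) ([], [], 0)
  -- `min(i)` : every box appended is nonempty, so `.getD 0` is never used
  st.1.foldl (fun a bx => a + (PySem.List.min? bx (fun x => x)).getD 0 * m) answer

-- ===== PORT B =====
def solution_alt (k : Int) (m : Int) (score : List Int) : Int :=
  let s := PySem.List.sorted score (fun x => x) true
  -- every index produced by range(m-1, len(s), m) is in bounds for m ≥ 1, so `.getD 0` is never used
  m * ((PySem.List.pyRange (m - 1) (s.length : Int) m).foldl
        (fun acc i => acc + (PySem.List.pyGet? s i).getD 0) 0)

-- ===== PRECONDITION & SPEC =====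
-- Pre_ excludes m = 0 (A raises ZeroDivisionError on any nonempty score, B always raises
-- ValueError) and negative m with at least |m| elements, where no caller would specify either
-- behaviour for a non-positive box size (A groups by cnt%m into boxes of |m| with a negative
-- multiplier, B's empty range yields 0); negative m with fewer than |m| elements stays inside.
def Pre_solution (k : Int) (m : Int) (score : List Int) : Prop :=
  1 ≤ m ∨ (m ≤ -1 ∧ (score.length : Int) < -m)
instance (k : Int) (m : Int) (score : List Int) : Decidable (Pre_solution k m score) := by unfold Pre_solution; infer_instance
def pvWitness_solution : Int × Int × List Int := (4, 2, [4, 1, 2, 3, 1])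
def Spec_solution (k : Int) (m : Int) (score : List Int) (out : Int) : Prop := out = solution_alt k m score
instance (k : Int) (m : Int) (score : List Int) (out : Int) : Decidable (Spec_solution k m score out) := by unfold Spec_solution; infer_instance

-- ===== CLAIM (what is proved, stated in full; the proofs are below) =====
def Claim_equal_solution : Prop := ∀ (k : Int) (m : Int) (score : List Int), Dom_solution k m score → Pre_solution k m score → Spec_solution k m score (solution k m score)

-- ===== LEMMAS AND PROOFS =====

-- cnt % m == 0 for 1 ≤ cnt ≤ m exactly at cnt = m
theorem modA_iff (m c : Int) (h1 : 1 ≤ c) (h2 : c ≤ m) : PySem.Int.mod c m = 0 ↔ c = m := by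
  rw [PySem.Int.mod_eq_zero_iff_dvd]
  constructor
  · intro h
    have := Int.le_of_dvd (by omega) h
    omega
  · rintro rfl; exact dvd_refl _

theorem stepA_flush (m : Int) (box : List (List Int)) (temp : List Int) (cnt i : Int)
    (h : PySem.Int.mod (cnt + 1) m = 0) :
    stepA m (box, temp, cnt) i = (box ++ [temp ++ [i]], [], 0) := by
  simp [stepA, h]

theorem stepA_cont (m : Int) (box : List (List Int)) (temp : List Int) (cnt i : Int)
    (h : ¬ PySem.Int.mod (cnt + 1) m = 0) :
    stepA m (box, temp, cnt) i = (box, temp ++ [i], cnt + 1) := by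
  simp [stepA, h]

-- the box accumulator is only appended to
theorem append_box (m : Int) : ∀ (l : List Int) (box : List (List Int)) (temp : List Int) (cnt : Int),
    (List.foldl (stepA m) (box, temp, cnt) l).1 = box ++ (List.foldl (stepA m) (([] : List (List Int)), temp, cnt) l).1 := by
  intro l
  induction l with
  | nil => intro box temp cnt; simp
  | cons i t ih =>
    intro box temp cnt
    by_cases h : PySem.Int.mod (cnt + 1) m = 0
    · rw [List.foldl_cons, List.foldl_cons, stepA_flush m box temp cnt i h,
          stepA_flush m [] temp cnt i h]
      simp only [List.nil_append]
      rw [ih (box ++ [temp ++ [i]]) [] 0, ih [temp ++ [i]] [] 0, List.append_assoc]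
    · rw [List.foldl_cons, List.foldl_cons, stepA_cont m box temp cnt i h,
          stepA_cont m [] temp cnt i h]
      exact ih box (temp ++ [i]) (cnt + 1)

-- fewer than m elements remaining: nothing more is boxed
theorem small_box (m : Int) (hm : 1 ≤ m) : ∀ (l temp : List Int) (box : List (List Int)),
    ((temp.length + l.length : Nat) : Int) < m →
    (List.foldl (stepA m) (box, temp, (temp.length : Int)) l).1 = box := by
  intro l
  induction l with
  | nil => intro temp box _; simp
  | cons i t ih =>
    intro temp box h
    have hm' : (temp.length : Int) + 1 < m := by
      push_cast [List.length_cons] at h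
      push_cast
      omega
    have hne : ¬ PySem.Int.mod ((temp.length : Int) + 1) m = 0 := by
      rw [modA_iff m _ (by omega) (by omega)]
      omega
    rw [List.foldl_cons, stepA_cont m box temp _ i hne]
    have hlen2 : (((temp ++ [i]).length + t.length : Nat) : Int) < m := by
      push_cast [List.length_append, List.length_cons, List.length_nil] at h ⊢
      omega
    have hres := ih (temp ++ [i]) box hlen2
    have hcast : (((temp ++ [i]).length : Nat) : Int) = (temp.length : Int) + 1 := by
      push_cast [List.length_append, List.length_cons, List.length_nil]
      omega
    rw [hcast] at hres
    exact hres

-- exactly enough elements to finish the current box: it is flushed and the state resets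
theorem fill_box (m : Int) (hm : 1 ≤ m) : ∀ (c temp : List Int) (box : List (List Int)),
    ((temp.length + c.length : Nat) : Int) = m → 1 ≤ c.length →
    List.foldl (stepA m) (box, temp, (temp.length : Int)) c = (box ++ [temp ++ c], [], 0) := by
  intro c
  induction c with
  | nil => intro temp box _ h1; simp at h1
  | cons i t ih =>
    intro temp box hlen _
    cases t with
    | nil =>
      have hc : (temp.length : Int) + 1 = m := by
        push_cast [List.length_cons, List.length_nil] at hlen
        push_cast
        omega
      have h0 : PySem.Int.mod ((temp.length : Int) + 1) m = 0 := by
        rw [modA_iff m _ (by omega) (by omega)]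
        omega
      rw [List.foldl_cons, stepA_flush m box temp _ i h0]
      simp
    | cons j t' =>
      have hlt : (temp.length : Int) + 1 < m := by
        push_cast [List.length_cons] at hlen
        push_cast
        omega
      have hne : ¬ PySem.Int.mod ((temp.length : Int) + 1) m = 0 := by
        rw [modA_iff m _ (by omega) (by omega)]
        omega
      rw [List.foldl_cons, stepA_cont m box temp _ i hne]
      have hlen2 : (((temp ++ [i]).length + (j :: t').length : Nat) : Int) = m := by
        push_cast [List.length_append, List.length_cons, List.length_nil] at hlen ⊢
        omega
      have hres := ih (temp ++ [i]) box hlen2 (by simp)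
      have hcast : (((temp ++ [i]).length : Nat) : Int) = (temp.length : Int) + 1 := by
        push_cast [List.length_append, List.length_cons, List.length_nil]
        omega
      rw [hcast] at hres
      rw [hres]
      simp

-- a positive count below |m| for negative m is never a multiple of m
theorem mod_ne_neg (m c : Int) (hm : m ≤ -1) (h1 : 1 ≤ c) (h2 : c < -m) :
    ¬ PySem.Int.mod c m = 0 := by
  rw [PySem.Int.mod_eq_zero_iff_dvd]
  intro hdvd
  have h3 : (-m) ∣ c := (neg_dvd).mpr hdvd
  have h4 := Int.le_of_dvd (by omega) h3
  omega

-- for negative m, fewer than |m| elements are never boxed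
theorem neg_box (m : Int) (hm : m ≤ -1) : ∀ (l temp : List Int) (box : List (List Int)),
    ((temp.length + l.length : Nat) : Int) < -m →
    (List.foldl (stepA m) (box, temp, (temp.length : Int)) l).1 = box := by
  intro l
  induction l with
  | nil => intro temp box _; simp
  | cons i t ih =>
    intro temp box h
    have hm' : (temp.length : Int) + 1 < -m := by
      push_cast [List.length_cons] at h
      omega
    have hne : ¬ PySem.Int.mod ((temp.length : Int) + 1) m = 0 :=
      mod_ne_neg m _ hm (by omega) hm'
    rw [List.foldl_cons, stepA_cont m box temp _ i hne]
    have hlen2 : (((temp ++ [i]).length + t.length : Nat) : Int) < -m := by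
      push_cast [List.length_append, List.length_cons, List.length_nil] at h ⊢
      omega
    have hres := ih (temp ++ [i]) box hlen2
    have hcast : (((temp ++ [i]).length : Nat) : Int) = (temp.length : Int) + 1 := by
      push_cast [List.length_append, List.length_cons, List.length_nil]
      omega
    rw [hcast] at hres
    exact hres

-- range(a, b, s) for s < 0 and a ≤ b is empty
theorem pr_nil_neg (a b s : Int) (hs : s < 0) (h : a ≤ b) : PySem.List.pyRange a b s = [] := by
  simp [PySem.List.pyRange, show ¬ s = 0 by omega, show ¬ 0 < s by omega,
        show ¬ b < a by omega]

-- in a nonincreasing list the last element is a lower bound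
theorem last_le (c : List Int) (hc : c ≠ []) (hp : c.Pairwise (· ≥ ·)) :
    ∀ y ∈ c, c.getLast hc ≤ y := by
  induction c with
  | nil => cases hc rfl
  | cons a t ih =>
    intro y hy
    cases t with
    | nil => simp at hy; simp [hy]
    | cons b t' =>
      rw [List.getLast_cons (by simp)]
      rcases List.mem_cons.1 hy with rfl | hy'
      · have hmem : (b :: t').getLast (by simp) ∈ b :: t' := List.getLast_mem _
        exact (List.pairwise_cons.1 hp).1 _ hmem
      · exact ih (by simp) (List.pairwise_cons.1 hp).2 y hy'

-- Python's min of a nonempty nonincreasing list is its last element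
theorem min_eq_last (c : List Int) (hc : c ≠ []) (hp : c.Pairwise (· ≥ ·)) :
    (PySem.List.min? c (fun x => x)).getD 0 = c.getLast hc := by
  cases hmin : PySem.List.min? c (fun x => x) with
  | none => exact absurd ((PySem.List.min?_eq_none_iff _ _).1 hmin) hc
  | some v =>
    have hv1 : v ∈ c := PySem.List.min?_mem hmin
    have hv2 : v ≤ c.getLast hc := PySem.List.min?_isMin hmin _ (List.getLast_mem hc)
    have hv3 : c.getLast hc ≤ v := last_le c hc hp v hv1
    simp [le_antisymm hv2 hv3]

-- range(a, b, s) for 0 < s, b ≤ a is empty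
theorem pr_nil (a b s : Int) (hs : 0 < s) (h : b ≤ a) : PySem.List.pyRange a b s = [] := by
  rw [PySem.List.pyRange_of_pos a b hs, if_neg (by omega)]
  simp

-- range(a, b, s) for 0 < s, a < b starts with a
theorem pr_cons (a b s : Int) (hs : 0 < s) (h : a < b) :
    PySem.List.pyRange a b s = a :: PySem.List.pyRange (a + s) b s := by
  rw [PySem.List.pyRange_of_pos a b hs, PySem.List.pyRange_of_pos (a + s) b hs, if_pos h]
  have hdiv : (b - a + s - 1) / s = (b - a - 1) / s + 1 := by
    have h1 := Int.add_mul_ediv_right (b - a - 1) 1 (by omega : s ≠ 0)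
    rw [show b - a + s - 1 = b - a - 1 + 1 * s by ring, h1]
  by_cases h2 : a + s < b
  · have hnum : (0 : Int) ≤ (b - a - 1) / s := Int.ediv_nonneg (by omega) (by omega)
    rw [if_pos h2]
    have harg : b - (a + s) + s - 1 = b - a - 1 := by ring
    rw [harg]
    have htn : ((b - a + s - 1) / s).toNat = ((b - a - 1) / s).toNat + 1 := by
      rw [hdiv]; omega
    rw [htn, List.range_succ_eq_map, List.map_cons, List.map_map]
    congr 1
    · push_cast; ring
    · apply List.map_congr_left
      intro x _
      simp only [Function.comp_apply]
      push_cast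
      ring
  · have hlt : b - a - 1 < s := by omega
    have hz : (b - a - 1) / s = 0 := Int.ediv_eq_zero_of_lt (by omega) hlt
    have htn : ((b - a + s - 1) / s).toNat = 1 := by rw [hdiv, hz]; omega
    rw [if_neg h2, htn]
    simp

-- shifting a positive-step range
theorem pr_shift (a b s : Int) (hs : 0 < s) :
    PySem.List.pyRange (a + s) b s = (PySem.List.pyRange a (b - s) s).map (· + s) := by
  rw [PySem.List.pyRange_of_pos (a + s) b hs, PySem.List.pyRange_of_pos a (b - s) hs]
  by_cases h : a + s < b
  · rw [if_pos h, if_pos (by omega : a < b - s), List.map_map]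
    have harg : b - (a + s) + s - 1 = b - s - a + s - 1 := by ring
    rw [harg]
    apply List.map_congr_left
    intro x _
    simp only [Function.comp_apply]
    ring
  · rw [if_neg h, if_neg (by omega : ¬ a < b - s)]
    simp

-- the core equivalence, by strong induction on the (sorted) list, one full box at a time
theorem main_lemma (m : Int) (hm : 1 ≤ m) : ∀ (n : Nat) (l : List Int), l.length = n → l.Pairwise (· ≥ ·) →
    (List.foldl (stepA m) (([] : List (List Int)), [], 0) l).1.foldl
        (fun a bx => a + (PySem.List.min? bx (fun x => x)).getD 0 * m) 0
      = m * ((PySem.List.pyRange (m - 1) (l.length : Int) m).foldl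
              (fun acc i => acc + (PySem.List.pyGet? l i).getD 0) 0) := by
  intro n
  induction n using Nat.strong_induction_on with
  | _ n IH =>
    intro l hlen hp
    by_cases hsm : (l.length : Int) < m
    · have h0 : (List.foldl (stepA m) (([] : List (List Int)), [], 0) l).1 = [] := by
        have := small_box m hm l [] [] (by simpa using hsm)
        simpa using this
      rw [h0, pr_nil _ _ _ (by omega) (by omega)]
      simp
    · push_neg at hsm
      set mn := m.toNat with hmn
      have hmc : (mn : Int) = m := Int.toNat_of_nonneg (by omega)
      have hmn1 : 1 ≤ mn := by omega
      have hlenm : mn ≤ l.length := by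
        have : (mn : Int) ≤ (l.length : Int) := by rw [hmc]; exact hsm
        exact_mod_cast this
      set tk := l.take mn with htk
      set r := l.drop mn with hr
      have hclen : tk.length = mn := List.length_take_of_le hlenm
      have hcr : l = tk ++ r := (List.take_append_drop _ _).symm
      have hcne : tk ≠ [] := by
        intro hx; rw [hx] at hclen; simp at hclen; omega
      have hpc : tk.Pairwise (· ≥ ·) := hp.sublist (List.take_sublist _ _)
      have hpr : r.Pairwise (· ≥ ·) := hp.sublist (List.drop_sublist _ _)
      have hrlen : r.length = l.length - mn := by simp [hr]
      -- A side: the first box is tk, the rest is A run on r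
      have hfill : List.foldl (stepA m) (([] : List (List Int)), [], 0) tk = ([tk], [], 0) := by
        have := fill_box m hm tk [] [] (by simp [hclen, hmc]) (by omega)
        simpa using this
      have hAside : (List.foldl (stepA m) (([] : List (List Int)), [], 0) l).1
          = tk :: (List.foldl (stepA m) (([] : List (List Int)), [], 0) r).1 := by
        conv_lhs => rw [hcr]
        rw [List.foldl_append, hfill, append_box m r [tk] [] 0]
        simp
      rw [hAside]
      simp only [List.foldl_cons]
      rw [PySem.List.foldl_add (g := fun bx => (PySem.List.min? bx (fun x => x)).getD 0 * m)]
      -- B side: peel the first index m-1 and shift the rest down by m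
      have hm1lt : m - 1 < (l.length : Int) := by omega
      rw [pr_cons _ _ _ (by omega) hm1lt]
      rw [pr_shift (m - 1) (l.length : Int) m (by omega)]
      simp only [List.foldl_cons, List.foldl_map]
      -- first strided element = last element of the first box
      have hidx : m - 1 = ((mn - 1 : Nat) : Int) := by push_cast; omega
      have hltn : mn - 1 < l.length := by omega
      have hmnc : mn - 1 < tk.length := by omega
      have hget : (PySem.List.pyGet? l (m - 1)).getD 0 = tk.getLast hcne := by
        rw [hidx, PySem.List.pyGet?_natCast]
        have hq : l[mn - 1]? = tk[mn - 1]? := by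
          conv_lhs => rw [hcr]
          exact List.getElem?_append_left hmnc
        rw [hq, List.getElem?_eq_getElem hmnc]
        simp only [Option.getD_some]
        rw [List.getLast_eq_getElem]
        congr 1
        omega
      -- remaining strided elements index into r
      have hcongr : ∀ acc : Int,
          (PySem.List.pyRange (m - 1) ((l.length : Int) - m) m).foldl
            (fun acc i => acc + (PySem.List.pyGet? l (i + m)).getD 0) acc
          = (PySem.List.pyRange (m - 1) ((l.length : Int) - m) m).foldl
            (fun acc i => acc + (PySem.List.pyGet? r i).getD 0) acc := by
        intro acc
        apply PySem.List.foldl_congr_mem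
        intro a i himem
        have hi := (PySem.List.mem_pyRange_iff_of_pos (by omega : (0:Int) < m) i).1 himem
        have h1 : i + m = ((i.toNat + mn : Nat) : Int) := by push_cast; omega
        have h2 : i = ((i.toNat : Nat) : Int) := by omega
        rw [h1, PySem.List.pyGet?_natCast]
        conv_rhs => rw [h2, PySem.List.pyGet?_natCast]
        rw [hr, List.getElem?_drop, Nat.add_comm mn i.toNat]
      rw [hcongr]
      have hrlen' : ((l.length : Int) - m) = (r.length : Int) := by
        rw [hrlen]; push_cast [hlenm]; omega
      rw [hrlen']
      rw [PySem.List.foldl_add (g := fun i => (PySem.List.pyGet? r i).getD 0)]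
      -- induction hypothesis on r, in the same sum shape
      have hIH := IH r.length (by omega) r rfl hpr
      rw [PySem.List.foldl_add (g := fun bx => (PySem.List.min? bx (fun x => x)).getD 0 * m),
          PySem.List.foldl_add (g := fun i => (PySem.List.pyGet? r i).getD 0)] at hIH
      rw [min_eq_last tk hcne hpc, hget]
      linear_combination hIH

-- ===== VERDICT (by name: the statement is the Claim_ definition above) =====
theorem solution_spec : Claim_equal_solution := by
  intro k m score _ hpre
  unfold Spec_solution solution solution_alt
  rcases hpre with hm | ⟨hm, hlen⟩
  · have hp : (PySem.List.sorted score (fun x => x) true).Pairwise (· ≥ ·) :=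
      (PySem.List.sorted_pairwise_rev score (fun x => x)).imp (fun h => h)
    exact main_lemma m hm _ (PySem.List.sorted score (fun x => x) true) rfl hp
  · have hslen : ((PySem.List.sorted score (fun x => x) true).length : Int) < -m := by
      rw [PySem.List.length_sorted]
      exact hlen
    have hbox : (List.foldl (stepA m) (([] : List (List Int)), [], 0)
        (PySem.List.sorted score (fun x => x) true)).1 = [] := by
      have := neg_box m hm (PySem.List.sorted score (fun x => x) true) [] []
        (by simpa using hslen)
      simpa using this
    show (List.foldl (fun a bx => a + (PySem.List.min? bx (fun x => x)).getD 0 * m) 0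
        (List.foldl (stepA m) (([] : List (List Int)), [], 0)
          (PySem.List.sorted score (fun x => x) true)).1)
      = m * ((PySem.List.pyRange (m - 1)
            (((PySem.List.sorted score (fun x => x) true).length : Nat) : Int) m).foldl
          (fun acc i => acc + (PySem.List.pyGet? (PySem.List.sorted score (fun x => x) true) i).getD 0) 0)
    rw [hbox, pr_nil_neg _ _ _ (by omega) (by omega)]
    simp
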